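-- pv_equiv track=rewrite | github.com/move-geun/baekjoon_py | 프로그래머스/1/86491. 최소직사각형/최소직사각형.py | solution
-- ===== SOURCE A (Python) =====
-- def solution(sizes):
--     max_w, max_h = 0, 0
--     for w,h in sizes:
--         if h>w:
--             if max_w < h :
--                 max_w = h
--             if max_h < w:
--                 max_h = w
--         else:
--             if max_w < w:
--                 max_w = w
--             if max_h < h:
--                 max_h = h
--
--     return max_w*max_h
-- ===== SOURCE B (Python) =====
-- def solution(sizes):
--     widths = sorted([0] + [max(w, h) for w, h in sizes])
--     heights = sorted([0] + [min(w, h) for w, h in sizes])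
--     return widths[-1] * heights[-1]
-- ===== Notes on version B (the rewrite author's own statement) =====
-- stated objective: alternative
-- what changed: Instead of maintaining two running maxima in one branchy accumulator loop, B normalizes each card, sorts the longer sides and the shorter sides (with a 0 floor), and reads each maximum off as the last element of the sorted list.
import Mathlib
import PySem

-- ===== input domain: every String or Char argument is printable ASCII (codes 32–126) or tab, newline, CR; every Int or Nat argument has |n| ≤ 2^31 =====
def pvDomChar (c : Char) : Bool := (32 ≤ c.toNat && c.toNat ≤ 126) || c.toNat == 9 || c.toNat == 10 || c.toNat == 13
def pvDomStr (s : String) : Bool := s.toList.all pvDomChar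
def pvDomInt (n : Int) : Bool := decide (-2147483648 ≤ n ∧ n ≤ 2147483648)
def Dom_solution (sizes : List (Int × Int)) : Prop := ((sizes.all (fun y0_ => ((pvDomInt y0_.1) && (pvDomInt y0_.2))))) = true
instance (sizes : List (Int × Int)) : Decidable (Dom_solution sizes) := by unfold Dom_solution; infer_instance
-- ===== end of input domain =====

-- B normalizes each card, sorts the longer sides and the shorter sides (with a 0 floor),
-- and reads each maximum off as the last element of the sorted list, instead of A's
-- single branchy accumulator loop (objective: alternative; B sorts, so it is O(n log n)).


-- ===== PORT A =====
-- literal transliteration of A's loop over (max_w, max_h)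
def solution (sizes : List (Int × Int)) : Int :=
  let st := sizes.foldl (fun (acc : Int × Int) (p : Int × Int) =>
    let (max_w, max_h) := acc
    let (w, h) := p
    if h > w then
      let max_w := if max_w < h then h else max_w
      let max_h := if max_h < w then w else max_h
      (max_w, max_h)
    else
      let max_w := if max_w < w then w else max_w
      let max_h := if max_h < h then h else max_h
      (max_w, max_h)) (0, 0)
  st.1 * st.2

-- ===== PORT B =====
-- widths = sorted([0] + [max(w,h) ...]); heights = sorted([0] + [min(w,h) ...]);
-- widths[-1] * heights[-1].  Both lists contain 0, so the [-1] index never raises;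
-- the '.getD 0' default of the Option-returning pyGet? is unreachable.
def solution_alt (sizes : List (Int × Int)) : Int :=
  let widths := PySem.List.sorted ((0 : Int) :: sizes.map (fun p => max p.1 p.2)) (fun x => x) false
  let heights := PySem.List.sorted ((0 : Int) :: sizes.map (fun p => min p.1 p.2)) (fun x => x) false
  (PySem.List.pyGet? widths (-1)).getD 0 * (PySem.List.pyGet? heights (-1)).getD 0

-- ===== PRECONDITION & SPEC =====
def Spec_solution (sizes : List (Int × Int)) (out : Int) : Prop := out = solution_alt sizes
instance (sizes : List (Int × Int)) (out : Int) : Decidable (Spec_solution sizes out) := by unfold Spec_solution; infer_instance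

-- ===== CLAIM =====
def Claim_equal_solution : Prop := ∀ (sizes : List (Int × Int)), Dom_solution sizes → Spec_solution sizes (solution sizes)

-- ===== LEMMAS AND PROOFS =====

-- the running maximum is one of the scanned elements
theorem foldl_max_mem (l : List Int) : ∀ (a : Int), l.foldl max a ∈ a :: l := by
  induction l with
  | nil => intro a; simp
  | cons b t ih =>
    intro a
    simp only [List.foldl_cons]
    rcases List.mem_cons.1 (ih (max a b)) with h' | h'
    · rw [h']; rcases max_choice a b with hm | hm <;> rw [hm] <;> simp
    · simp [h']

-- every scanned element is ≤ the running maximum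
theorem le_foldl_max (l : List Int) : ∀ (a : Int), ∀ x ∈ a :: l, x ≤ l.foldl max a := by
  induction l with
  | nil => intro a x hx; simp only [List.mem_singleton] at hx; simp [hx]
  | cons b t ih =>
    intro a x hx
    simp only [List.foldl_cons]
    have hm : max a b ≤ t.foldl max (max a b) := ih (max a b) (max a b) (by simp)
    rcases List.mem_cons.1 hx with rfl | h'
    · exact le_trans (le_max_left x b) hm
    · rcases List.mem_cons.1 h' with rfl | h''
      · exact le_trans (le_max_right a x) hm
      · exact ih (max a b) x (List.mem_cons_of_mem _ h'')

-- in a ≤-sorted list every member is ≤ the last element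
theorem pairwise_le_getLast? (s : List Int) (hp : s.Pairwise (· ≤ ·)) :
    ∀ x ∈ s, ∀ y, s.getLast? = some y → x ≤ y := by
  induction s with
  | nil => intro x hx; simp at hx
  | cons b t ih =>
    intro x hx y hy
    rcases List.pairwise_cons.1 hp with ⟨hb, ht⟩
    cases t with
    | nil =>
      simp at hy hx; omega
    | cons c u =>
      rw [List.getLast?_cons_cons] at hy
      have hyt : y ∈ c :: u := by
        have := List.mem_getLast?_eq_getLast (l := c :: u) hy
        exact this.choose_spec ▸ List.getLast_mem _
      rcases List.mem_cons.1 hx with h' | h'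
      · exact le_trans (h' ▸ hb y hyt) le_rfl
      · exact ih ht x h' y hy

-- last element of sorted (a :: l) is the running maximum foldl max a l
theorem getLast?_sorted_cons (a : Int) (l : List Int) :
    (PySem.List.sorted (a :: l) (fun x => x) false).getLast? = some (l.foldl max a) := by
  set s := PySem.List.sorted (a :: l) (fun x => x) false with hs
  have hne : s ≠ [] := by
    intro h
    have := (PySem.List.sorted_eq_nil_iff (xs := a :: l) (key := fun x => x) (rev := false)).1 (hs ▸ h)
    simp at this
  obtain ⟨y, hy⟩ := Option.isSome_iff_exists.1 (List.getLast?_isSome.2 hne)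
  have hymem : y ∈ s := by
    have := List.mem_getLast?_eq_getLast (l := s) hy
    exact this.choose_spec ▸ List.getLast_mem _
  have hyin : y ∈ a :: l := (PySem.List.mem_sorted _ _ _ _).1 hymem
  have hp : s.Pairwise (· ≤ ·) := by
    have := PySem.List.sorted_pairwise (xs := a :: l) (key := fun x => x)
    simpa using this
  have hfold_mem : l.foldl max a ∈ s := (PySem.List.mem_sorted _ _ _ _).2 (foldl_max_mem l a)
  have h1 : y ≤ l.foldl max a := le_foldl_max l a y hyin
  have h2 : l.foldl max a ≤ y := pairwise_le_getLast? s hp _ hfold_mem y hy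
  rw [hy]; congr 1; omega

-- A's fold with accumulator (a,b) equals the pair of the two independent max-folds.
theorem solution_fold_eq (sizes : List (Int × Int)) : ∀ (a b : Int),
    sizes.foldl (fun (acc : Int × Int) (p : Int × Int) =>
      let (max_w, max_h) := acc
      let (w, h) := p
      if h > w then
        let max_w := if max_w < h then h else max_w
        let max_h := if max_h < w then w else max_h
        (max_w, max_h)
      else
        let max_w := if max_w < w then w else max_w
        let max_h := if max_h < h then h else max_h
        (max_w, max_h)) (a, b)
    = ((sizes.map (fun p => max p.1 p.2)).foldl max a,
       (sizes.map (fun p => min p.1 p.2)).foldl max b) := by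
  induction sizes with
  | nil => intro a b; simp
  | cons p rest ih =>
    intro a b
    obtain ⟨w, h⟩ := p
    simp only [List.foldl_cons, List.map_cons]
    rw [ih]
    congr 1 <;> congr 1 <;> simp only [max_def, min_def] <;> split_ifs <;> omega

-- ===== VERDICT =====
theorem solution_spec : Claim_equal_solution := by
  intro sizes _
  unfold Spec_solution solution solution_alt
  rw [solution_fold_eq]
  simp only [PySem.List.pyGet?_neg_one, getLast?_sorted_cons, Option.getD_some]
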